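-- pv_equiv track=rewrite | github.com/TSK-io/AntiFraud-Audio-Detector | audio_guard.py | _select_json_object
-- ===== SOURCE A (Python) =====
-- from typing import Any
--
-- def _select_json_object(objects: list[dict[str, Any]]) -> dict[str, Any]:
--     key_priority = (
--         {"fraud_result", "risk_level"},
--         {"high_risk_behaviors"},
--         {"is_fraud"},
--         {"fraud_type"},
--         {"scene"},
--     )
--     for keys in key_priority:
--         for obj in objects:
--             if keys & obj.keys():
--                 return obj
--     return objects[0]
-- ===== SOURCE B (Python) =====
-- def _select_json_object(objects):
--     key_priority = (
--         {"fraud_result", "risk_level"},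
--         {"high_risk_behaviors"},
--         {"is_fraud"},
--         {"fraud_type"},
--         {"scene"},
--     )
--     n = len(key_priority)
--     best = None
--     best_rank = n
--     for obj in objects:
--         rank = next((i for i, keys in enumerate(key_priority) if keys & obj.keys()), n)
--         if rank < best_rank:
--             best, best_rank = obj, rank
--     return best if best is not None else objects[0]
-- ===== Notes on version B (the rewrite author's own statement) =====
-- stated objective: alternative
-- what changed: Replaced A's nested scans (for each priority key set, rescan all objects) by a single pass over the objects that computes each object's priority rank and keeps the object of strictly smallest rank (first object wins ties), falling back to objects[0].
import Mathlib
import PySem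

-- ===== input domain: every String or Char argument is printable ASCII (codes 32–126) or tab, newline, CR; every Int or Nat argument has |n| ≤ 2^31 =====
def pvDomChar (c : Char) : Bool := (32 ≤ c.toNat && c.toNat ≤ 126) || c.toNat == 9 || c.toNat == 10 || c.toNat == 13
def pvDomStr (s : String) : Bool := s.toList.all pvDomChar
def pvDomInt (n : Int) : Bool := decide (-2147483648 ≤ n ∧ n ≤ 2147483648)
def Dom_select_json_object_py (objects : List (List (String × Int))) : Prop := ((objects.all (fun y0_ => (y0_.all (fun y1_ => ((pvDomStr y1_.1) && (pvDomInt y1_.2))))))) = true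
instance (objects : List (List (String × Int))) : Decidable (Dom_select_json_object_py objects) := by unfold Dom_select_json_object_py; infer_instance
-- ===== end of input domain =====

-- B replaces A's nested priority-then-objects scans by ONE pass over the objects that
-- tracks the object of smallest priority rank (strict update, so the first object wins ties);
-- objective: alternative decomposition, same cost.

-- the key_priority tuple, shared verbatim by both programs
def pvPriority : List (List String) := [["fraud_result", "risk_level"],
  ["high_risk_behaviors"], ["is_fraud"], ["fraud_type"], ["scene"]]

-- truthiness of `keys & obj.keys()`: some key of obj lies in keys
def pvHit (keys : List String) (obj : List (String × Int)) : Bool :=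
  obj.any (fun kv => keys.contains kv.1)

-- ===== PORT A =====
-- A's nested loops: for keys in key_priority: for obj in objects: if keys & obj.keys(): return obj
def pvFindA : List (List String) → List (List (String × Int)) → Option (List (String × Int))
  | [], _ => none
  | keys :: rest, objects =>
    match objects.find? (fun obj => pvHit keys obj) with
    | some obj => some obj
    | none => pvFindA rest objects

def select_json_object_py (objects : List (List (String × Int))) : List (String × Int) :=
  match pvFindA pvPriority objects with
  | some obj => obj
  | none => objects.headI   -- objects[0]; Pre_ guarantees objects ≠ []

-- ===== PORT B =====
-- rank = next((i for i, keys in enumerate(key_priority) if keys & obj.keys()), n)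
def pvRankB (obj : List (String × Int)) : Nat :=
  pvPriority.findIdx (fun keys => pvHit keys obj)

-- loop body: if rank < best_rank: best, best_rank = obj, rank   (best_rank starts at n = 5)
def pvStepB (s : Option (List (String × Int) × Nat)) (obj : List (String × Int)) :
    Option (List (String × Int) × Nat) :=
  let r := pvRankB obj
  match s with
  | none => if r < 5 then some (obj, r) else none
  | some (b, br) => if r < br then some (obj, r) else some (b, br)

def select_json_object_py_alt (objects : List (List (String × Int))) : List (String × Int) :=
  match objects.foldl pvStepB none with
  | some (b, _) => b
  | none => objects.headI   -- objects[0]; Pre_ guarantees objects ≠ []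

-- ===== PRECONDITION & SPEC =====
-- A (and B) raise IndexError on objects[0] when the list is empty and nothing matched;
-- Pre_ excludes exactly the empty list.
def Pre_select_json_object_py (objects : List (List (String × Int))) : Prop := objects ≠ []
instance (objects : List (List (String × Int))) : Decidable (Pre_select_json_object_py objects) := by
  unfold Pre_select_json_object_py; infer_instance

def pvWitness_select_json_object_py : (List (List (String × Int))) := [[("is_fraud", 1)]]

def Spec_select_json_object_py (objects : List (List (String × Int))) (out : List (String × Int)) : Prop := out = select_json_object_py_alt objects
instance (objects : List (List (String × Int))) (out : List (String × Int)) : Decidable (Spec_select_json_object_py objects out) := by unfold Spec_select_json_object_py; infer_instance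

-- ===== CLAIM (what is proved, stated in full; the proofs are below) =====
def Claim_equal_select_json_object_py : Prop := ∀ (objects : List (List (String × Int))), Dom_select_json_object_py objects → Pre_select_json_object_py objects → Spec_select_json_object_py objects (select_json_object_py objects)

-- ===== LEMMAS AND PROOFS =====

-- generic single-pass argmin step, over an arbitrary rank function and bound
def pvStep (n : Nat) (rk : List (String × Int) → Nat)
    (s : Option (List (String × Int) × Nat)) (o : List (String × Int)) :
    Option (List (String × Int) × Nat) :=
  match s with
  | none => if rk o < n then some (o, rk o) else none
  | some (b, br) => if rk o < br then some (o, rk o) else some (b, br)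

theorem pvStepB_eq : pvStepB = pvStep 5 pvRankB := by
  funext s o
  cases s <;> simp [pvStepB, pvStep]

-- once an object of rank 0 is kept, it is never replaced (strict <)
theorem pv_zero_stable (rk : List (String × Int) → Nat) (n : Nat) (b : List (String × Int)) :
    ∀ objs : List (List (String × Int)),
    objs.foldl (pvStep n rk) (some (b, 0)) = some (b, 0) := by
  intro objs
  induction objs with
  | nil => rfl
  | cons o os ih => simpa [pvStep] using ih

-- if the first rank-0 object is o₀, the fold ends at (o₀, 0), from none or any positive state
theorem pv_zero_case (rk : List (String × Int) → Nat) (n : Nat) (hn : 0 < n)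
    (o₀ : List (String × Int)) :
    ∀ (objs : List (List (String × Int))) (s : Option (List (String × Int) × Nat)),
    (s = none ∨ ∃ b br, s = some (b, br) ∧ 0 < br) →
    objs.find? (fun o => rk o == 0) = some o₀ →
    objs.foldl (pvStep n rk) s = some (o₀, 0) := by
  intro objs
  induction objs with
  | nil => intro s _ h; simp at h
  | cons o os ih =>
    intro s hs hf
    rw [List.find?_cons] at hf
    cases hb : rk o == 0 with
    | true =>
      have h0 : rk o = 0 := by simpa using hb
      simp only [hb] at hf
      injection hf with hf
      subst hf
      have : pvStep n rk s o = some (o, 0) := by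
        rcases hs with h | ⟨b, br, rfl, hbr⟩
        · subst h; simp [pvStep, h0, hn]
        · simp [pvStep, h0, hbr]
      simpa [List.foldl_cons, this] using pv_zero_stable rk n o os
    | false =>
      have h0 : ¬ rk o = 0 := by simpa using hb
      simp only [hb] at hf
      refine ih (pvStep n rk s o) ?_ hf
      rcases hs with h | ⟨b, br, rfl, hbr⟩
      · subst h
        by_cases hlt : rk o < n
        · exact Or.inr ⟨o, rk o, by simp [pvStep, hlt], Nat.pos_of_ne_zero h0⟩
        · exact Or.inl (by simp [pvStep, hlt])
      · by_cases hlt : rk o < br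
        · exact Or.inr ⟨o, rk o, by simp [pvStep, hlt], Nat.pos_of_ne_zero h0⟩
        · exact Or.inr ⟨b, br, by simp [pvStep, hlt], hbr⟩

def pvOmap : Option (List (String × Int) × Nat) → Option (List (String × Int) × Nat)
  | none => none
  | some (b, br) => some (b, br + 1)

-- shifting every rank (and the bound) by one commutes with the fold
theorem pv_shift (rk rk' : List (String × Int) → Nat) (n : Nat) :
    ∀ (objs : List (List (String × Int))) (s : Option (List (String × Int) × Nat)),
    (∀ o ∈ objs, rk' o = rk o + 1) →
    objs.foldl (pvStep (n + 1) rk') (pvOmap s) = pvOmap (objs.foldl (pvStep n rk) s) := by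
  intro objs
  induction objs with
  | nil => intro s _; rfl
  | cons o os ih =>
    intro s hr
    have ho : rk' o = rk o + 1 := hr o (by simp)
    have hstep : pvStep (n + 1) rk' (pvOmap s) o = pvOmap (pvStep n rk s o) := by
      rcases s with _ | ⟨b, br⟩
      · by_cases h : rk o < n <;>
          simp [pvStep, pvOmap, ho, h]
      · by_cases h : rk o < br <;>
          simp [pvStep, pvOmap, ho, h]
    rw [List.foldl_cons, List.foldl_cons, hstep,
      ih (pvStep n rk s o) (fun x hx => hr x (by simp [hx]))]

-- the generalized rank of B with respect to an arbitrary priority list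
def pvRank (ps : List (List String)) (obj : List (String × Int)) : Nat :=
  ps.findIdx (fun keys => pvHit keys obj)

-- main bridge: A's nested search equals the single-pass argmin fold
theorem pv_main (ps : List (List String)) (objs : List (List (String × Int))) :
    pvFindA ps objs = (objs.foldl (pvStep ps.length (pvRank ps)) none).map Prod.fst := by
  induction ps generalizing objs with
  | nil =>
    have : objs.foldl (pvStep 0 (pvRank [])) none = none := by
      induction objs with
      | nil => rfl
      | cons o os ih => simpa [pvStep] using ih
    simp [pvFindA, this]
  | cons k ks ih =>
    rw [pvFindA]
    cases hf : objs.find? (fun obj => pvHit k obj) with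
    | some o₀ =>
      have hf0 : objs.find? (fun o => pvRank (k :: ks) o == 0) = some o₀ := by
        have : ∀ o : List (String × Int), (pvRank (k :: ks) o == 0) = pvHit k o := by
          intro o
          by_cases h : pvHit k o = true <;> simp [pvRank, List.findIdx_cons, h]
        rw [show (fun o => pvRank (k :: ks) o == 0) = (fun obj => pvHit k obj) from funext this]
        exact hf
      rw [pv_zero_case (pvRank (k :: ks)) (k :: ks).length (by simp) o₀ objs none
        (Or.inl rfl) hf0]
      rfl
    | none =>
      have hnone : ∀ o ∈ objs, pvHit k o = false := by
        intro o ho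
        simpa using List.find?_eq_none.mp hf o ho
      have hshift : ∀ o ∈ objs, pvRank (k :: ks) o = pvRank ks o + 1 := by
        intro o ho
        simp [pvRank, List.findIdx_cons, hnone o ho]
      have h1 : objs.foldl (pvStep (ks.length + 1) (pvRank (k :: ks))) none
          = pvOmap (objs.foldl (pvStep ks.length (pvRank ks)) none) :=
        pv_shift (pvRank ks) (pvRank (k :: ks)) ks.length objs none hshift
      show pvFindA ks objs
          = (objs.foldl (pvStep (ks.length + 1) (pvRank (k :: ks))) none).map Prod.fst
      rw [h1, ih objs]
      cases objs.foldl (pvStep ks.length (pvRank ks)) none with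
      | none => rfl
      | some p => cases p; rfl

-- ===== VERDICT (by name: the statement is the Claim_ definition above) =====
theorem select_json_object_py_spec : Claim_equal_select_json_object_py := by
  intro objects _ _
  unfold Spec_select_json_object_py select_json_object_py select_json_object_py_alt
  rw [pvStepB_eq]
  have h := pv_main pvPriority objects
  have h5 : pvPriority.length = 5 := rfl
  have hrk : pvRank pvPriority = pvRankB := rfl
  rw [h5, hrk] at h
  rw [h]
  cases objects.foldl (pvStep 5 pvRankB) none with
  | none => rfl
  | some p => cases p; rfl
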